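-- pv_equiv track=rewrite | github.com/dsg813/AAI-CPE-EE-551-Final | changeBoard.py | gravity_changer
-- ===== SOURCE A (Python) =====
-- def gravity_changer(board):
--     """
--     Moves cells with a "-" as their 5th character down by one row.
--     Assumes gravity_check has already been applied and processes from the bottom row upward.
--     Returns True if any changes are made to the board, otherwise False.
--     """
--     rows = len(board)
--     cols = len(board[0])
--     has_changes = False  # Track if any changes are made
--
--     # Process each row starting from the second-to-last row upward
--     for y in range(rows - 2, -1, -1):  # Start from second-to-last row
--         for x in range(cols):
--             cell = board[y][x]
--             if cell[4] == "-" and cell[:4] != "0000":  # Check if the 5th character is "-"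
--                 # Move current cell down and clear the original position
--                 board[y + 1][x] = cell  # Move the cell down
--                 board[y][x] = "0000-00"  # Set current cell to empty
--                 has_changes = True  # Mark that a change has been made
--
--     return board, has_changes
-- ===== SOURCE B (Python) =====
-- def gravity_changer(board):
--     """
--     Two-phase re-implementation: collect every falling cell on a single scan of
--     the original board, then clear all source positions, then write all
--     destination positions (mutates board in place, like the original).
--     """
--     cols = len(board[0])
--     moves = [(y, x, board[y][x])
--              for y in range(len(board) - 1)
--              for x in range(cols)
--              if board[y][x][4] == "-" and board[y][x][:4] != "0000"]
--     for y, x, _ in moves: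
--         board[y][x] = "0000-00"
--     for y, x, cell in moves:
--         board[y + 1][x] = cell
--     return board, bool(moves)
-- ===== Notes on version B (the rewrite author's own statement) =====
-- stated objective: alternative
-- what changed: Replaces the bottom-up in-place interleaved move-and-clear double loop by a two-phase algorithm: one scan of the original board collecting all falling cells as a move list, then a clear-all-sources pass followed by a write-all-destinations pass, with has_changes read off the move list.
import Mathlib
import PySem

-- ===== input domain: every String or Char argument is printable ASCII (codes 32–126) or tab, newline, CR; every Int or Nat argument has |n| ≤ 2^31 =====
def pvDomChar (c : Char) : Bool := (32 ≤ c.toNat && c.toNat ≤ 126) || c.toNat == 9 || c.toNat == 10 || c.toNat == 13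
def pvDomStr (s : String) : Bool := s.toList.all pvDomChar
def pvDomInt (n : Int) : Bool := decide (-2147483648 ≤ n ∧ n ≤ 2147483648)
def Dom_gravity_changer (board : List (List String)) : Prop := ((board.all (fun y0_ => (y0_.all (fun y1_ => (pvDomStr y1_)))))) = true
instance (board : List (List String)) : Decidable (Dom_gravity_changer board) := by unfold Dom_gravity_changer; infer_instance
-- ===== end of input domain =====

-- Two-phase re-implementation (collect all falling cells, clear all sources, then write all
-- destinations) proved to return the same value as A's bottom-up in-place scan; the Python
-- versions mutate `board` in place identically on Pre_, the proof is about the return value.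


-- ===== PORT A =====
-- literal transliteration of A: bottom-up double loop, reading and writing the evolving board
def gravity_changer (board : List (List String)) : List (List String) × Bool :=
  let rows : Int := board.length
  let cols : Int := (PySem.List.pyGetD board 0 []).length
  (PySem.List.pyRange (rows - 2) (-1) (-1)).foldl
    (fun st y =>
      (PySem.List.pyRange 0 cols 1).foldl
        (fun st x =>
          let cell := PySem.List.pyGetD (PySem.List.pyGetD st.1 y []) x ""
          if PySem.Str.pyGet? cell 4 = some '-' ∧ PySem.Str.slice cell none (some 4) ≠ "0000" then
            let b1 := PySem.List.pySetD st.1 (y + 1)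
              (PySem.List.pySetD (PySem.List.pyGetD st.1 (y + 1) []) x cell)
            (PySem.List.pySetD b1 y (PySem.List.pySetD (PySem.List.pyGetD b1 y []) x "0000-00"), true)
          else st)
        st)
    (board, false)

-- ===== PORT B =====
-- literal transliteration of B: collect the move list from the original board, then
-- clear every source, then write every destination
def gravity_changer_alt (board : List (List String)) : List (List String) × Bool :=
  let cols : Int := (PySem.List.pyGetD board 0 []).length
  let moves : List (Int × Int × String) :=
    (PySem.List.pyRange 0 ((board.length : Int) - 1) 1).flatMap (fun y =>
      (PySem.List.pyRange 0 cols 1).filterMap (fun x =>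
        let cell := PySem.List.pyGetD (PySem.List.pyGetD board y []) x ""
        if PySem.Str.pyGet? cell 4 = some '-' ∧ PySem.Str.slice cell none (some 4) ≠ "0000" then
          some (y, x, cell)
        else none))
  let b1 := moves.foldl (fun b m =>
    PySem.List.pySetD b m.1 (PySem.List.pySetD (PySem.List.pyGetD b m.1 []) m.2.1 "0000-00")) board
  let b2 := moves.foldl (fun b m =>
    PySem.List.pySetD b (m.1 + 1) (PySem.List.pySetD (PySem.List.pyGetD b (m.1 + 1) []) m.2.1 m.2.2)) b1
  (b2, !moves.isEmpty)

-- ===== PRECONDITION & SPEC =====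
-- Pre_ is exactly the set of inputs on which Python A returns (no IndexError): non-empty board,
-- every scanned row at least cols wide with every scanned cell at least 5 characters long, and
-- every fall out of row rows-2 landing inside the last row.
def Pre_gravity_changer (board : List (List String)) : Prop :=
  board ≠ [] ∧
  (∀ y, y < board.length - 1 →
    (board.getD 0 []).length ≤ (board.getD y []).length ∧
    ∀ x, x < (board.getD 0 []).length → 5 ≤ ((board.getD y []).getD x "").toList.length) ∧
  (2 ≤ board.length →
    ∀ x, x < (board.getD 0 []).length →
      (PySem.Str.pyGet? ((board.getD (board.length - 2) []).getD x "") 4 = some '-' ∧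
       PySem.Str.slice ((board.getD (board.length - 2) []).getD x "") none (some 4) ≠ "0000") →
      x < (board.getD (board.length - 1) []).length)
instance (board : List (List String)) : Decidable (Pre_gravity_changer board) := by
  unfold Pre_gravity_changer; infer_instance
def pvWitness_gravity_changer : List (List String) :=
  [["1111-00", "0000-00"], ["0000-00", "2222+00"]]
def Spec_gravity_changer (board : List (List String)) (out : List (List String) × Bool) : Prop := out = gravity_changer_alt board
instance (board : List (List String)) (out : List (List String) × Bool) : Decidable (Spec_gravity_changer board out) := by unfold Spec_gravity_changer; infer_instance

-- ===== CLAIM (what is proved, stated in full; the proofs are below) =====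
def Claim_equal_gravity_changer : Prop := ∀ (board : List (List String)), Dom_gravity_changer board → Pre_gravity_changer board → Spec_gravity_changer board (gravity_changer board)

-- ===== LEMMAS AND PROOFS =====

abbrev gcCond (c : String) : Prop :=
  PySem.Str.pyGet? c 4 = some '-' ∧ PySem.Str.slice c none (some 4) ≠ "0000"

def gcGet (b : List (List String)) (y x : Nat) : String := (b.getD y []).getD x ""

def gcSet (b : List (List String)) (y x : Nat) (v : String) : List (List String) :=
  b.set y ((b.getD y []).set x v)

def gcApply (b : List (List String)) (ops : List ((Nat × Nat) × String)) : List (List String) :=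
  ops.foldl (fun b op => gcSet b op.1.1 op.1.2 op.2) b

theorem gc_getD_set {α : Type} [Inhabited α] (l : List α) (i j : Nat) (v d : α) :
    (l.set i v).getD j d = if j = i ∧ i < l.length then v else l.getD j d := by
  simp only [List.getD, List.getElem?_set]
  split_ifs with h1 h2 h3 h4 <;> simp_all

theorem gc_len_gcSet (b : List (List String)) (y x : Nat) (v : String) :
    (gcSet b y x v).length = b.length := by simp [gcSet]

theorem gc_gcApply_cons (b : List (List String)) (op : (Nat × Nat) × String)
    (rest : List ((Nat × Nat) × String)) :
    gcApply b (op :: rest) = gcApply (gcSet b op.1.1 op.1.2 op.2) rest := rfl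

theorem gc_gcApply_append (b : List (List String)) (l1 l2 : List ((Nat × Nat) × String)) :
    gcApply b (l1 ++ l2) = gcApply (gcApply b l1) l2 := List.foldl_append ..

theorem gc_row_gcSet (b : List (List String)) (y x : Nat) (v : String) (y' : Nat) :
    (gcSet b y x v).getD y' [] = if y' = y ∧ y < b.length then (b.getD y []).set x v else b.getD y' [] := by
  unfold gcSet
  rw [gc_getD_set]

theorem gc_rowlen_gcSet (b : List (List String)) (y x : Nat) (v : String) (y' : Nat) :
    ((gcSet b y x v).getD y' []).length = (b.getD y' []).length := by
  rw [gc_row_gcSet]; split_ifs with h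
  · rw [List.length_set, h.1]
  · rfl

theorem gc_gcGet_gcSet (b : List (List String)) (y x : Nat) (v : String) (y' x' : Nat) :
    gcGet (gcSet b y x v) y' x'
      = if y' = y ∧ x' = x ∧ y < b.length ∧ x < (b.getD y []).length then v
        else gcGet b y' x' := by
  unfold gcGet
  rw [gc_row_gcSet]
  by_cases h1 : y' = y ∧ y < b.length
  · rw [if_pos h1, gc_getD_set]
    by_cases h2 : x' = x ∧ x < (b.getD y []).length
    · rw [if_pos h2, if_pos ⟨h1.1, h2.1, h1.2, h2.2⟩]
    · rw [if_neg h2, if_neg (by tauto), h1.1]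
  · rw [if_neg h1, if_neg (by tauto)]

theorem gc_len_gcApply (ops : List ((Nat × Nat) × String)) :
    ∀ b, (gcApply b ops).length = b.length := by
  induction ops with
  | nil => intro b; rfl
  | cons op rest ih => intro b; rw [gc_gcApply_cons, ih, gc_len_gcSet]

theorem gc_rowlen_gcApply (ops : List ((Nat × Nat) × String)) :
    ∀ b y, ((gcApply b ops).getD y []).length = (b.getD y []).length := by
  induction ops with
  | nil => intro b y; rfl
  | cons op rest ih => intro b y; rw [gc_gcApply_cons, ih, gc_rowlen_gcSet]

theorem gc_gcGet_gcApply_untouched (ops : List ((Nat × Nat) × String)) :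
    ∀ b Y X, (∀ op ∈ ops, op.1 ≠ (Y, X)) → gcGet (gcApply b ops) Y X = gcGet b Y X := by
  induction ops with
  | nil => intro b Y X _; rfl
  | cons op rest ih =>
    intro b Y X h
    rw [gc_gcApply_cons, ih _ _ _ (fun o ho => h o (List.mem_cons_of_mem _ ho)),
        gc_gcGet_gcSet]
    have hne := h op List.mem_cons_self
    split_ifs with hc
    · exact absurd (Prod.ext hc.1.symm hc.2.1.symm) hne
    · rfl

theorem gc_row_gcApply_untouched (ops : List ((Nat × Nat) × String)) :
    ∀ b y, (∀ op ∈ ops, op.1.1 ≠ y) → (gcApply b ops).getD y [] = b.getD y [] := by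
  induction ops with
  | nil => intro b y _; rfl
  | cons op rest ih =>
    intro b y h
    rw [gc_gcApply_cons, ih _ _ (fun o ho => h o (List.mem_cons_of_mem _ ho)),
        gc_row_gcSet]
    have hne := h op List.mem_cons_self
    split_ifs with hc
    · exact absurd hc.1.symm hne
    · rfl

theorem gc_gcGet_gcApply (ops : List ((Nat × Nat) × String)) :
    ∀ b Y X, gcGet (gcApply b ops) Y X
      = ops.foldl (fun cur op =>
          if op.1 = (Y, X) ∧ Y < b.length ∧ X < (b.getD Y []).length then op.2 else cur)
        (gcGet b Y X) := by
  induction ops with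
  | nil => intro b Y X; rfl
  | cons op rest ih =>
    intro b Y X
    rw [gc_gcApply_cons, ih, List.foldl_cons]
    have hfun : (fun (cur : String) (o : (Nat × Nat) × String) =>
        if o.1 = (Y, X) ∧ Y < (gcSet b op.1.1 op.1.2 op.2).length ∧
            X < ((gcSet b op.1.1 op.1.2 op.2).getD Y []).length then o.2 else cur)
      = (fun cur o => if o.1 = (Y, X) ∧ Y < b.length ∧ X < (b.getD Y []).length then o.2 else cur) := by
      funext cur o
      rw [gc_len_gcSet, gc_rowlen_gcSet]
    rw [hfun, gc_gcGet_gcSet]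
    congr 1
    obtain ⟨⟨oy, ox⟩, v⟩ := op
    simp only [Prod.mk.injEq]
    by_cases h1 : Y = oy
    · by_cases h2 : X = ox
      · subst h1; subst h2; simp
      · simp only [eq_comm (a := oy) (b := Y), eq_comm (a := ox) (b := X)] at *
        simp [h2]
    · simp only [eq_comm (a := oy) (b := Y)] at *
      simp [h1]

theorem gc_isEmpty_append {α : Type} (l1 l2 : List α) :
    (l1 ++ l2).isEmpty = (l1.isEmpty && l2.isEmpty) := by
  cases l1 <;> simp

def gcPairA (board : List (List String)) (y x : Nat) : List ((Nat × Nat) × String) :=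
  if gcCond (gcGet board y x) then
    [((y + 1, x), gcGet board y x), ((y, x), "0000-00")]
  else []

def gcRowA (board : List (List String)) (y : Nat) : List ((Nat × Nat) × String) :=
  (List.range (board.getD 0 []).length).flatMap (gcPairA board y)

def gcOpsA (board : List (List String)) : List ((Nat × Nat) × String) :=
  ((List.range (board.length - 1)).reverse).flatMap (gcRowA board)

def gcMoveRow (board : List (List String)) (y : Nat) : List (Nat × Nat × String) :=
  (List.range (board.getD 0 []).length).filterMap (fun x =>
    if gcCond (gcGet board y x) then some (y, x, gcGet board y x) else none)

def gcMoves (board : List (List String)) : List (Nat × Nat × String) :=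
  (List.range (board.length - 1)).flatMap (gcMoveRow board)

def gcClears (board : List (List String)) : List ((Nat × Nat) × String) :=
  (gcMoves board).map (fun m => ((m.1, m.2.1), "0000-00"))

def gcWrites (board : List (List String)) : List ((Nat × Nat) × String) :=
  (gcMoves board).map (fun m => ((m.1 + 1, m.2.1), m.2.2))

theorem gc_mem_gcPairA (board : List (List String)) (y x : Nat) (op : (Nat × Nat) × String)
    (h : op ∈ gcPairA board y x) : op.1 = (y + 1, x) ∨ op.1 = (y, x) := by
  unfold gcPairA at h
  split_ifs at h with hc
  · simp only [List.mem_cons, List.not_mem_nil, or_false] at h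
    rcases h with rfl | rfl
    · exact Or.inl rfl
    · exact Or.inr rfl
  · simp at h

theorem gc_mem_gcRowA (board : List (List String)) (y : Nat) (op : (Nat × Nat) × String)
    (h : op ∈ gcRowA board y) : (op.1.1 = y + 1 ∨ op.1.1 = y) ∧ op.1.2 < (board.getD 0 []).length := by
  unfold gcRowA at h
  rw [List.mem_flatMap] at h
  obtain ⟨x, hx, hop⟩ := h
  rw [List.mem_range] at hx
  rcases gc_mem_gcPairA board y x op hop with h | h <;>
    · rw [h]; exact ⟨by simp, hx⟩

theorem gc_innerA (board : List (List String)) (y : Nat) :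
    ∀ (xs : List Nat) (b : List (List String)) (fl : Bool),
      xs.Nodup → (∀ x ∈ xs, gcGet b y x = gcGet board y x) →
      xs.foldl (fun st x =>
          if gcCond (gcGet st.1 y x) then
            (gcSet (gcSet st.1 (y + 1) x (gcGet st.1 y x)) y x "0000-00", true)
          else st) (b, fl)
        = (gcApply b (xs.flatMap (gcPairA board y)),
           fl || !(xs.flatMap (gcPairA board y)).isEmpty) := by
  intro xs
  induction xs with
  | nil => intro b fl _ _; simp [gcApply]
  | cons x xs ih =>
    intro b fl hnd hread
    rw [List.nodup_cons] at hnd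
    have hx : gcGet b y x = gcGet board y x := hread x List.mem_cons_self
    rw [List.foldl_cons, List.flatMap_cons]
    by_cases hc : gcCond (gcGet board y x)
    · rw [if_pos (by rw [hx]; exact hc), hx]
      have hpair : gcPairA board y x = [((y + 1, x), gcGet board y x), ((y, x), "0000-00")] :=
        if_pos hc
      have hb1 : gcSet (gcSet b (y + 1) x (gcGet board y x)) y x "0000-00"
          = gcApply b (gcPairA board y x) := by rw [hpair]; rfl
      rw [hb1, ih _ _ hnd.2 ?_, gc_gcApply_append]
      · rw [hpair]
        simp []
      · intro x' hx'
        rw [gc_gcGet_gcApply_untouched _ _ _ _ ?_, hread x' (List.mem_cons_of_mem _ hx')]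
        intro op hop
        rcases gc_mem_gcPairA board y x op hop with h | h <;> rw [h]
        · simp only [ne_eq, Prod.mk.injEq, not_and]
          intro h1 _; omega
        · simp only [ne_eq, Prod.mk.injEq, not_and]
          intro _ h2
          exact absurd (h2 ▸ hx') hnd.1
    · rw [if_neg (by rw [hx]; exact hc)]
      have hpair : gcPairA board y x = [] := if_neg hc
      rw [hpair, List.nil_append]
      exact ih _ _ hnd.2 (fun x' hx' => hread x' (List.mem_cons_of_mem _ hx'))

theorem gc_outerA (board : List (List String)) :
    ∀ (ys : List Nat) (b : List (List String)) (fl : Bool),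
      ys.Pairwise (fun a c => c ≠ a ∧ c ≠ a + 1) →
      (∀ y ∈ ys, ∀ x, gcGet b y x = gcGet board y x) →
      ys.foldl (fun st y =>
          (List.range (board.getD 0 []).length).foldl (fun st x =>
            if gcCond (gcGet st.1 y x) then
              (gcSet (gcSet st.1 (y + 1) x (gcGet st.1 y x)) y x "0000-00", true)
            else st) st) (b, fl)
        = (gcApply b (ys.flatMap (gcRowA board)),
           fl || !(ys.flatMap (gcRowA board)).isEmpty) := by
  intro ys
  induction ys with
  | nil => intro b fl _ _; simp [gcApply]
  | cons y ys ih =>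
    intro b fl hpw hread
    rw [List.pairwise_cons] at hpw
    rw [List.foldl_cons, List.flatMap_cons]
    rw [gc_innerA board y (List.range (board.getD 0 []).length) b fl List.nodup_range
      (fun x _ => hread y List.mem_cons_self x)]
    have : (List.range (board.getD 0 []).length).flatMap (gcPairA board y) = gcRowA board y := rfl
    rw [this, ih _ _ hpw.2 ?_, gc_gcApply_append]
    · simp [gc_isEmpty_append, Bool.not_and, Bool.or_assoc]
    · intro y' hy' x
      rw [gcGet, gc_row_gcApply_untouched _ _ _ ?_, ← gcGet, hread y' (List.mem_cons_of_mem _ hy') x]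
      intro op hop
      have h := gc_mem_gcRowA board y op hop
      have h2 := hpw.1 y' hy'
      rcases h.1 with h1 | h1 <;> omega

theorem gc_pyRange_down (N : Nat) :
    PySem.List.pyRange ((N : Int) - 2) (-1) (-1)
      = ((List.range (N - 1)).reverse).map (Nat.cast : Nat → Int) := by
  rw [PySem.List.pyRange_neg_one]
  have h : ((N : Int) - 2 - -1).toNat = N - 1 := by omega
  rw [h, List.range_eq_range' (n := N - 1), List.reverse_range', ← List.range_eq_range']
  rw [List.map_map]
  apply List.map_congr_left
  intro k hk
  rw [List.mem_range] at hk
  simp only [Function.comp]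
  omega

theorem gc_pyRange_up (C : Nat) :
    PySem.List.pyRange 0 (C : Int) 1 = (List.range C).map (Nat.cast : Nat → Int) := by
  rw [PySem.List.pyRange_one]
  simp

theorem gc_cast_succ (k : Nat) : ((k : Int) + 1) = (((k + 1 : Nat)) : Int) := by push_cast; ring

theorem gc_portA_norm (board : List (List String)) :
    gravity_changer board
      = (gcApply board (gcOpsA board), !(gcOpsA board).isEmpty) := by
  unfold gravity_changer
  dsimp only []
  rw [PySem.List.pyGetD_zero]
  rw [gc_pyRange_down, gc_pyRange_up, List.foldl_map]
  have hbody : (fun (st : List (List String) × Bool) (y : Nat) =>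
      (List.map (Nat.cast : Nat → Int) (List.range (board.getD 0 []).length)).foldl
        (fun st (x : Int) =>
          let cell := PySem.List.pyGetD (PySem.List.pyGetD st.1 (y : Int) []) x ""
          if PySem.Str.pyGet? cell 4 = some '-' ∧ PySem.Str.slice cell none (some 4) ≠ "0000" then
            (PySem.List.pySetD
              (PySem.List.pySetD st.1 ((y : Int) + 1)
                (PySem.List.pySetD (PySem.List.pyGetD st.1 ((y : Int) + 1) []) x cell))
              (y : Int)
              (PySem.List.pySetD
                (PySem.List.pyGetD
                  (PySem.List.pySetD st.1 ((y : Int) + 1)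
                    (PySem.List.pySetD (PySem.List.pyGetD st.1 ((y : Int) + 1) []) x cell)) (y : Int) [])
                x "0000-00"), true)
          else st) st)
    = (fun (st : List (List String) × Bool) (y : Nat) =>
        (List.range (board.getD 0 []).length).foldl (fun st x =>
          if gcCond (gcGet st.1 y x) then
            (gcSet (gcSet st.1 (y + 1) x (gcGet st.1 y x)) y x "0000-00", true)
          else st) st) := by
    funext st y
    rw [List.foldl_map]
    apply PySem.List.foldl_congr_mem
    intro st' x _
    simp only [gc_cast_succ, PySem.List.pyGetD_natCast, PySem.List.pySetD_natCast,
      gcGet, gcSet, gcCond]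
  rw [hbody]
  rw [gc_outerA board ((List.range (board.length - 1)).reverse) board false ?pw ?rd]
  · rw [Bool.false_or]; rfl
  case pw =>
    rw [List.pairwise_reverse]
    apply List.Pairwise.imp ?_ (List.pairwise_lt_range (n := board.length - 1))
    intro a b h
    constructor <;> omega
  case rd => intro y _ x; rfl

theorem gc_pyRange_up_pred (N : Nat) :
    PySem.List.pyRange 0 ((N : Int) - 1) 1 = (List.range (N - 1)).map (Nat.cast : Nat → Int) := by
  rw [PySem.List.pyRange_one]
  have h : ((N : Int) - 1 - 0).toNat = N - 1 := by omega
  rw [h]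
  simp

theorem gc_movesPort (board : List (List String)) :
    (List.range (board.length - 1)).flatMap (fun y =>
        (List.range (board.getD 0 []).length).filterMap (fun x =>
          if gcCond (gcGet board y x) then
            some ((y : Int), (x : Int), gcGet board y x)
          else none))
      = (gcMoves board).map (fun m => ((m.1 : Int), (m.2.1 : Int), m.2.2)) := by
  unfold gcMoves
  rw [List.map_flatMap]
  apply List.flatMap_congr
  intro y _
  unfold gcMoveRow
  rw [List.map_filterMap]
  apply List.filterMap_congr
  intro x _
  split_ifs <;> rfl

theorem gc_portB_norm (board : List (List String)) :
    gravity_changer_alt board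
      = (gcApply (gcApply board (gcClears board)) (gcWrites board), !(gcMoves board).isEmpty) := by
  unfold gravity_changer_alt
  dsimp only []
  rw [PySem.List.pyGetD_zero, gc_pyRange_up_pred, gc_pyRange_up, List.flatMap_map]
  have hmv : (List.range (board.length - 1)).flatMap (fun (y : Nat) =>
      ((List.range (board.getD 0 []).length).map (Nat.cast : Nat → Int)).filterMap (fun x =>
        if PySem.Str.pyGet? (PySem.List.pyGetD (PySem.List.pyGetD board (y : Int) []) x "") 4 = some '-' ∧
           PySem.Str.slice (PySem.List.pyGetD (PySem.List.pyGetD board (y : Int) []) x "") none (some 4) ≠ "0000" then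
          some ((y : Int), x, PySem.List.pyGetD (PySem.List.pyGetD board (y : Int) []) x "")
        else none))
      = (gcMoves board).map (fun m => ((m.1 : Int), (m.2.1 : Int), m.2.2)) := by
    rw [← gc_movesPort board]
    apply List.flatMap_congr
    intro y _
    rw [List.filterMap_map]
    apply List.filterMap_congr
    intro x _
    simp only [Function.comp, PySem.List.pyGetD_natCast, gcGet, gcCond]
  rw [hmv, List.isEmpty_map, List.foldl_map, List.foldl_map]
  have hclear : (gcMoves board).foldl
      (fun (b : List (List String)) (m : Nat × Nat × String) =>
        PySem.List.pySetD b ((m.1 : Int))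
          (PySem.List.pySetD (PySem.List.pyGetD b ((m.1 : Int)) []) ((m.2.1 : Int)) "0000-00")) board
      = gcApply board (gcClears board) := by
    unfold gcClears gcApply
    rw [List.foldl_map]
    apply PySem.List.foldl_congr_mem
    intro b m _
    simp only [PySem.List.pyGetD_natCast, PySem.List.pySetD_natCast, gcSet]
  rw [hclear]
  have hwrite : (gcMoves board).foldl
      (fun (b : List (List String)) (m : Nat × Nat × String) =>
        PySem.List.pySetD b ((m.1 : Int) + 1)
          (PySem.List.pySetD (PySem.List.pyGetD b ((m.1 : Int) + 1) []) ((m.2.1 : Int)) m.2.2))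
      (gcApply board (gcClears board))
      = gcApply (gcApply board (gcClears board)) (gcWrites board) := by
    unfold gcWrites gcApply
    rw [List.foldl_map]
    apply PySem.List.foldl_congr_mem
    intro b m _
    simp only [gc_cast_succ, PySem.List.pyGetD_natCast, PySem.List.pySetD_natCast, gcSet]
  rw [hwrite]

theorem gc_flatMap_range_supp2 {α : Type} (g : Nat → List α) (a b : Nat) (hab : a < b)
    (hs : ∀ y, y ≠ a → y ≠ b → g y = []) :
    ∀ m : Nat,
    ((List.range m).flatMap g = (if a < m then g a else []) ++ (if b < m then g b else []))
    ∧ ((List.range m).reverse.flatMap g = (if b < m then g b else []) ++ (if a < m then g a else [])) := by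
  intro m
  induction m with
  | zero => simp
  | succ m ih =>
    have hra : List.range (m + 1) = List.range m ++ [m] := List.range_succ
    constructor
    · rw [hra, List.flatMap_append, ih.1, List.flatMap_cons, List.flatMap_nil, List.append_nil]
      rcases eq_or_ne m a with rfl | hma
      · rw [if_neg (by omega), if_neg (by omega), if_pos (by omega), if_neg (by omega)]
        simp
      · rcases eq_or_ne m b with rfl | hmb
        · rw [if_pos (by omega), if_neg (by omega), if_pos (by omega), if_pos (by omega)]
          simp
        · rw [hs m hma hmb, List.append_nil]
          split_ifs <;> first | rfl | omega
    · rw [hra, List.reverse_append, List.flatMap_append, ih.2]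
      simp only [List.reverse_cons, List.reverse_nil, List.nil_append, List.flatMap_cons,
        List.flatMap_nil, List.append_nil]
      rcases eq_or_ne m a with rfl | hma
      · simp [show ¬ b < m from by omega, show ¬ b < m + 1 from by omega]
      · rcases eq_or_ne m b with rfl | hmb
        · simp [show a < m from by omega, show a < m + 1 from by omega]
        · rw [hs m hma hmb, List.nil_append]
          split_ifs <;> first | rfl | omega

theorem gc_filterMap_if {α β : Type} (l : List α) (c : α → Prop) [DecidablePred c] (v : α → β) :
    l.filterMap (fun a => if c a then some (v a) else none)
      = l.flatMap (fun a => if c a then [v a] else []) := by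
  induction l with
  | nil => rfl
  | cons a l ih =>
    rw [List.filterMap_cons, List.flatMap_cons]
    split_ifs with hc
    · rw [ih]; rfl
    · rw [ih]; rfl

theorem gc_filter_gcPairA (board : List (List String)) (Y X : Nat) (y x : Nat) :
    (gcPairA board y x).filter (fun op => decide (op.1 = (Y, X)))
      = (if y + 1 = Y ∧ x = X ∧ gcCond (gcGet board y x) then [((Y, X), gcGet board y x)] else [])
        ++ (if y = Y ∧ x = X ∧ gcCond (gcGet board y x) then [((Y, X), "0000-00")] else []) := by
  unfold gcPairA
  by_cases hc : gcCond (gcGet board y x)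
  · rw [if_pos hc]
    by_cases h1 : y + 1 = Y ∧ x = X
    · obtain ⟨rfl, rfl⟩ := h1
      rw [if_pos ⟨rfl, rfl, hc⟩, if_neg (fun h => absurd h.1 (by omega))]
      simp [Prod.ext_iff]
    · by_cases h2 : y = Y ∧ x = X
      · obtain ⟨rfl, rfl⟩ := h2
        rw [if_neg (fun h => absurd h.1 (by omega)), if_pos ⟨rfl, rfl, hc⟩]
        simp [Prod.ext_iff]
      · have n1 : ¬((y + 1, x) = (Y, X)) := by
          rw [Prod.ext_iff]; exact h1
        have n2 : ¬((y, x) = (Y, X)) := by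
          rw [Prod.ext_iff]; exact h2
        rw [if_neg (fun h => h1 ⟨h.1, h.2.1⟩), if_neg (fun h => h2 ⟨h.1, h.2.1⟩)]
        simp [n1, n2]
  · rw [if_neg hc, if_neg (fun h => hc h.2.2), if_neg (fun h => hc h.2.2)]
    rfl

theorem gc_filter_gcRowA (board : List (List String)) (Y X y : Nat) :
    (gcRowA board y).filter (fun op => decide (op.1 = (Y, X)))
      = (if y + 1 = Y ∧ X < (board.getD 0 []).length ∧ gcCond (gcGet board y X) then
          [((Y, X), gcGet board y X)] else [])
        ++ (if y = Y ∧ X < (board.getD 0 []).length ∧ gcCond (gcGet board y X) then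
          [((Y, X), "0000-00")] else []) := by
  unfold gcRowA
  rw [List.filter_flatMap]
  rw [List.flatMap_congr (fun x _ => gc_filter_gcPairA board Y X y x)]
  rw [(gc_flatMap_range_supp2 _ X (X + 1) (by omega)
      (fun x hx1 _ => by
        rw [if_neg (fun h => hx1 h.2.1), if_neg (fun h => hx1 h.2.1)]; rfl)
      (board.getD 0 []).length).1]
  try dsimp only []
  simp only [Nat.succ_ne_self, false_and, and_false, if_false, 
    true_and, List.append_nil, ite_self]
  by_cases hC : X < (board.getD 0 []).length
  · rw [if_pos hC]
    congr 1
    · by_cases hcc : y + 1 = Y ∧ gcCond (gcGet board y X)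
      · rw [if_pos ⟨hcc.1, hcc.2⟩, if_pos ⟨hcc.1, hC, hcc.2⟩]
      · rw [if_neg (fun h => hcc ⟨h.1, h.2⟩), if_neg (fun h => hcc ⟨h.1, h.2.2⟩)]
    · by_cases hcc : y = Y ∧ gcCond (gcGet board y X)
      · rw [if_pos ⟨hcc.1, hcc.2⟩, if_pos ⟨hcc.1, hC, hcc.2⟩]
      · rw [if_neg (fun h => hcc ⟨h.1, h.2⟩), if_neg (fun h => hcc ⟨h.1, h.2.2⟩)]
  · rw [if_neg hC, if_neg (fun h => hC h.2.1), if_neg (fun h => hC h.2.1)]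
    rfl

theorem gc_filter_gcOpsA (board : List (List String)) (Y X : Nat) :
    (gcOpsA board).filter (fun op => decide (op.1 = (Y, X)))
      = (if Y + 1 < board.length ∧ X < (board.getD 0 []).length ∧ gcCond (gcGet board Y X) then
          [((Y, X), "0000-00")] else [])
        ++ (if 1 ≤ Y ∧ Y < board.length ∧ X < (board.getD 0 []).length ∧
              gcCond (gcGet board (Y - 1) X) then
          [((Y, X), gcGet board (Y - 1) X)] else []) := by
  unfold gcOpsA
  rw [List.filter_flatMap]
  rw [List.flatMap_congr (fun y _ => gc_filter_gcRowA board Y X y)]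
  rcases Nat.eq_zero_or_pos Y with rfl | hY
  · rw [(gc_flatMap_range_supp2 _ 0 1 (by omega)
        (fun y hy1 _ => by
          rw [if_neg (fun h => absurd h.1 (by omega)), if_neg (fun h => hy1 h.1)]; rfl)
        (board.length - 1)).2]
    try dsimp only []
    simp only [show (1 + 1 : Nat) ≠ 0 from by omega, show (1 : Nat) ≠ 0 from by omega,
      show ¬ (1 ≤ (0 : Nat)) from by omega,
      false_and, if_false, true_and,
      List.append_nil, List.nil_append, ite_self]
    by_cases hN : 0 < board.length - 1
    · rw [if_pos hN]
      by_cases hcc : X < (board.getD 0 []).length ∧ gcCond (gcGet board 0 X)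
      · rw [if_pos ⟨hcc.1, hcc.2⟩, if_pos ⟨by omega, hcc.1, hcc.2⟩]
      · rw [if_neg (fun h => hcc ⟨h.1, h.2⟩), if_neg (fun h => hcc ⟨h.2.1, h.2.2⟩)]
    · rw [if_neg hN, if_neg (fun h => hN (by omega))]
  · rw [(gc_flatMap_range_supp2 _ (Y - 1) Y (by omega)
        (fun y hy1 hy2 => by
          rw [if_neg (fun h => hy1 (by omega)), if_neg (fun h => hy2 h.1)]; rfl)
        (board.length - 1)).2]
    try dsimp only []
    simp only [Nat.succ_ne_self, show Y - 1 ≠ Y from by omega, show Y - 1 + 1 = Y from by omega,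
      false_and, if_false, true_and,
      List.append_nil, List.nil_append]
    congr 1
    · by_cases hN : Y < board.length - 1
      · rw [if_pos hN]
        by_cases hcc : X < (board.getD 0 []).length ∧ gcCond (gcGet board Y X)
        · rw [if_pos ⟨hcc.1, hcc.2⟩, if_pos ⟨by omega, hcc.1, hcc.2⟩]
        · rw [if_neg (fun h => hcc ⟨h.1, h.2⟩), if_neg (fun h => hcc ⟨h.2.1, h.2.2⟩)]
      · rw [if_neg hN, if_neg (fun h => hN (by omega))]
    · by_cases hN : Y - 1 < board.length - 1
      · rw [if_pos hN]
        by_cases hcc : X < (board.getD 0 []).length ∧ gcCond (gcGet board (Y - 1) X)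
        · rw [if_pos ⟨hcc.1, hcc.2⟩, if_pos ⟨hY, by omega, hcc.1, hcc.2⟩]
        · rw [if_neg (fun h => hcc ⟨h.1, h.2⟩), if_neg (fun h => hcc ⟨h.2.2.1, h.2.2.2⟩)]
      · rw [if_neg hN, if_neg (fun h => hN (by omega))]

theorem gc_filter_move_single (board : List (List String)) (Y X y x : Nat) (q : Nat × Nat × String → Bool)
    (hq : ∀ m, q m = decide ((m.1, m.2.1) = (Y, X))) :
    ((if gcCond (gcGet board y x) then [(y, x, gcGet board y x)] else []).filter q)
      = if y = Y ∧ x = X ∧ gcCond (gcGet board y x) then [(y, x, gcGet board y x)] else [] := by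
  by_cases hc : gcCond (gcGet board y x)
  · rw [if_pos hc, List.filter_cons, List.filter_nil, hq]
    by_cases h : y = Y ∧ x = X
    · obtain ⟨rfl, rfl⟩ := h
      rw [if_pos (by simp), if_pos ⟨rfl, rfl, hc⟩]
    · rw [if_neg (by
          simp only [decide_eq_true_eq, Prod.ext_iff]
          exact fun hp => h ⟨hp.1, hp.2⟩),
        if_neg (fun hh => h ⟨hh.1, hh.2.1⟩)]
  · rw [if_neg hc, if_neg (fun hh => hc hh.2.2)]
    rfl

theorem gc_filter_moveRow (board : List (List String)) (Y X y : Nat) (q : Nat × Nat × String → Bool)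
    (hq : ∀ m, q m = decide ((m.1, m.2.1) = (Y, X))) :
    (gcMoveRow board y).filter q
      = if y = Y ∧ X < (board.getD 0 []).length ∧ gcCond (gcGet board y X) then
          [(Y, X, gcGet board Y X)] else [] := by
  unfold gcMoveRow
  rw [gc_filterMap_if, List.filter_flatMap]
  rw [List.flatMap_congr (fun x _ => gc_filter_move_single board Y X y x q hq)]
  rw [(gc_flatMap_range_supp2 _ X (X + 1) (by omega)
      (fun x hx1 _ => by rw [if_neg (fun h => hx1 h.2.1)])
      (board.getD 0 []).length).1]
  try dsimp only []
  simp only [Nat.succ_ne_self, false_and, and_false, if_false, 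
    true_and, List.append_nil, ite_self]
  by_cases hC : X < (board.getD 0 []).length
  · rw [if_pos hC]
    by_cases hcc : y = Y ∧ gcCond (gcGet board y X)
    · obtain ⟨rfl, hc2⟩ := hcc
      rw [if_pos ⟨rfl, hc2⟩, if_pos ⟨rfl, hC, hc2⟩]
    · rw [if_neg (fun h => hcc ⟨h.1, h.2⟩), if_neg (fun h => hcc ⟨h.1, h.2.2⟩)]
  · rw [if_neg hC, if_neg (fun h => hC h.2.1)]
    try rfl

theorem gc_filter_gcClears (board : List (List String)) (Y X : Nat) :
    (gcClears board).filter (fun op => decide (op.1 = (Y, X)))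
      = (if Y + 1 < board.length ∧ X < (board.getD 0 []).length ∧ gcCond (gcGet board Y X) then
          [((Y, X), "0000-00")] else []) := by
  unfold gcClears gcMoves
  rw [List.filter_map]
  rw [List.filter_flatMap]
  rw [List.flatMap_congr (fun y _ => gc_filter_moveRow board Y X y
      ((fun (op : (Nat × Nat) × String) => decide (op.1 = (Y, X))) ∘
        (fun (m : Nat × Nat × String) => ((m.1, m.2.1), "0000-00"))) (fun m => rfl))]
  rw [(gc_flatMap_range_supp2 _ Y (Y + 1) (by omega)
      (fun y hy1 _ => by rw [if_neg (fun h => hy1 h.1)])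
      (board.length - 1)).1]
  try dsimp only []
  simp only [Nat.succ_ne_self, false_and, if_false, 
    true_and, List.append_nil, ite_self]
  by_cases hN : Y < board.length - 1
  · rw [if_pos hN]
    by_cases hcc : X < (board.getD 0 []).length ∧ gcCond (gcGet board Y X)
    · rw [if_pos ⟨hcc.1, hcc.2⟩, List.map_cons, List.map_nil, if_pos ⟨by omega, hcc.1, hcc.2⟩]
    · rw [if_neg (fun h => hcc ⟨h.1, h.2⟩), List.map_nil, if_neg (fun h => hcc ⟨h.2.1, h.2.2⟩)]
  · rw [if_neg hN, List.map_nil, if_neg (fun h => hN (by omega))]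

theorem gc_filter_gcWrites (board : List (List String)) (Y X : Nat) :
    (gcWrites board).filter (fun op => decide (op.1 = (Y, X)))
      = (if 1 ≤ Y ∧ Y < board.length ∧ X < (board.getD 0 []).length ∧
            gcCond (gcGet board (Y - 1) X) then
          [((Y, X), gcGet board (Y - 1) X)] else []) := by
  unfold gcWrites gcMoves
  rw [List.filter_map]
  rcases Nat.eq_zero_or_pos Y with rfl | hY
  · rw [List.filter_eq_nil_iff.mpr (fun m _ => by
      simp only [Function.comp, decide_eq_true_eq, Prod.ext_iff]
      omega)]
    rw [List.map_nil, if_neg (fun h => absurd h.1 (by omega))]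
  · rw [List.filter_flatMap]
    have hq : ∀ m : Nat × Nat × String,
        ((fun (op : (Nat × Nat) × String) => decide (op.1 = (Y, X))) ∘
          (fun (m : Nat × Nat × String) => ((m.1 + 1, m.2.1), m.2.2))) m
          = decide ((m.1, m.2.1) = (Y - 1, X)) := by
      intro m
      simp only [Function.comp]
      rw [decide_eq_decide]
      rw [Prod.ext_iff, Prod.ext_iff]
      constructor <;> rintro ⟨h1, h2⟩ <;> exact ⟨by omega, h2⟩
    rw [List.flatMap_congr (fun y _ => gc_filter_moveRow board (Y - 1) X y _ hq)]
    rw [(gc_flatMap_range_supp2 _ (Y - 1) Y (by omega)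
        (fun y hy1 hy2 => by rw [if_neg (fun h => hy1 h.1)])
        (board.length - 1)).1]
    try dsimp only []
    simp only [show Y ≠ Y - 1 from by omega, false_and, if_false,
      true_and, List.append_nil, ite_self]
    by_cases hN : Y - 1 < board.length - 1
    · rw [if_pos hN]
      by_cases hcc : X < (board.getD 0 []).length ∧ gcCond (gcGet board (Y - 1) X)
      · rw [if_pos ⟨hcc.1, hcc.2⟩, List.map_cons, List.map_nil,
            if_pos ⟨hY, by omega, hcc.1, hcc.2⟩]
        simp [show Y - 1 + 1 = Y from by omega]
      · rw [if_neg (fun h => hcc ⟨h.1, h.2⟩), List.map_nil,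
            if_neg (fun h => hcc ⟨h.2.2.1, h.2.2.2⟩)]
    · rw [if_neg hN, List.map_nil, if_neg (fun h => hN (by omega))]

theorem gc_foldl_posfilter (Y X : Nat) (P : Prop) [Decidable P]
    (ops : List ((Nat × Nat) × String)) (init : String) :
    ops.foldl (fun cur op => if op.1 = (Y, X) ∧ P then op.2 else cur) init
      = (ops.filter (fun op => decide (op.1 = (Y, X)))).foldl
          (fun cur op => if P then op.2 else cur) init := by
  rw [List.foldl_filter]
  apply PySem.List.foldl_congr_mem
  intro cur op _
  by_cases h1 : op.1 = (Y, X)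
  · simp [h1]
  · simp [h1]

theorem gc_boards_eq (board : List (List String)) :
    gcApply board (gcOpsA board)
      = gcApply (gcApply board (gcClears board)) (gcWrites board) := by
  rw [← gc_gcApply_append]
  apply List.ext_getElem
  · rw [gc_len_gcApply, gc_len_gcApply]
  intro Y h1 h2
  apply List.ext_getElem
  · rw [← List.getD_eq_getElem _ [] h1, ← List.getD_eq_getElem _ [] h2,
        gc_rowlen_gcApply, gc_rowlen_gcApply]
  intro X hx1 hx2
  have hg : ∀ (b : List (List String)) (hY : Y < b.length) (hX : X < (b[Y]'hY).length),
      (b[Y]'hY)[X]'hX = gcGet b Y X := by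
    intro b hY hX
    unfold gcGet
    rw [List.getD_eq_getElem _ [] hY, List.getD_eq_getElem _ "" hX]
  rw [hg _ h1 hx1, hg _ h2 hx2, gc_gcGet_gcApply, gc_gcGet_gcApply,
      gc_foldl_posfilter, gc_foldl_posfilter, gc_filter_gcOpsA,
      List.filter_append, gc_filter_gcClears, gc_filter_gcWrites]

theorem gc_flag_eq (board : List (List String)) :
    (gcOpsA board).isEmpty = (gcMoves board).isEmpty := by
  apply Bool.eq_iff_iff.mpr
  rw [List.isEmpty_iff, List.isEmpty_iff]
  unfold gcOpsA gcMoves gcRowA gcMoveRow gcPairA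
  simp only [List.flatMap_eq_nil_iff, List.filterMap_eq_nil_iff, List.mem_reverse]
  constructor
  · intro h y hy x hx
    have h2 := h y hy x hx
    by_cases hc : gcCond (gcGet board y x)
    · rw [if_pos hc] at h2
      exact absurd h2 (by simp)
    · rw [if_neg hc]
  · intro h y hy x hx
    have h2 := h y hy x hx
    by_cases hc : gcCond (gcGet board y x)
    · rw [if_pos hc] at h2
      exact absurd h2 (by simp)
    · rw [if_neg hc]

-- ===== VERDICT (by name: the statement is the Claim_ definition above) =====
theorem gravity_changer_spec : Claim_equal_gravity_changer := by
  intro board _ _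
  unfold Spec_gravity_changer
  rw [gc_portA_norm, gc_portB_norm, gc_boards_eq, gc_flag_eq]
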